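-- pv_equiv track=rewrite | github.com/ranto-dev/hackaton-project | mlamina/utils.py | fix_path
-- ===== SOURCE A (Python) =====
-- def fix_path(path):
--     visited = set()
--     new_path = []
--     for node in path:
--         if node in visited:
--             break
--         new_path.append(node)
--         visited.add(node)
--         if node == 'SmartOne':
--             break
--     if new_path[-1] != 'SmartOne':
--         return None
--     return new_path
-- ===== SOURCE B (Python) =====
-- def fix_path(path):
--     # Boundary-index formulation: find the index of the first repeated element
--     # and the index of the first 'SmartOne'; slice instead of accumulating.
--     seen = set()
--     d = None
--     for i, node in enumerate(path):
--         if node in seen: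
--             d = i
--             break
--         seen.add(node)
--     try:
--         s = path.index('SmartOne')
--     except ValueError:
--         return None
--     if d is None or s < d:
--         return path[:s + 1]
--     return None
-- ===== Notes on version B (the rewrite author's own statement) =====
-- stated objective: alternative
-- what changed: B replaces A's incremental append/visited accumulation and break logic by computing two boundary indices in closed form (first-repeat index d and first 'SmartOne' index s) and returning the slice path[:s+1] when s precedes d, else None.
import Mathlib
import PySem

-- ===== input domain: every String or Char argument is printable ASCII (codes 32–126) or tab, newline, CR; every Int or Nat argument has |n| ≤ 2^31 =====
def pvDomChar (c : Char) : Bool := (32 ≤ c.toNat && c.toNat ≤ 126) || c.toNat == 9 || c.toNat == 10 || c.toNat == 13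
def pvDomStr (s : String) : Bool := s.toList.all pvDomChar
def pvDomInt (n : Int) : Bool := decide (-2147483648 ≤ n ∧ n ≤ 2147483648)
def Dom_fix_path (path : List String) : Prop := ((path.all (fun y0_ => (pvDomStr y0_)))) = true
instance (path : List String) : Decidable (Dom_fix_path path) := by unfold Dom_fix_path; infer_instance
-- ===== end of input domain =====

-- B computes the truncation by boundary indices (first-repeat index, first 'SmartOne' index)
-- and a slice instead of A's accumulating loop; equal cost, different decomposition.
-- On the empty list A raises IndexError; Pre_ excludes it.

-- ===== PORT A =====
-- the for-loop of A: state = (visited set, new_path accumulator), break modelled by returning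
def fixLoopA : List String → PySem.Set String → List String → List String
  | [], _, acc => acc
  | node :: rest, visited, acc =>
    if PySem.Set.contains visited node then acc
    else
      let acc' := acc ++ [node]
      if node = "SmartOne" then acc'
      else fixLoopA rest (PySem.Set.add visited node) acc'

def fix_path (path : List String) : Option (List String) :=
  match PySem.List.pyGet? (fixLoopA path PySem.Set.empty []) (-1) with   -- new_path[-1]; none = IndexError (excluded by Pre_)
  | none => none
  | some last => if last ≠ "SmartOne" then none else some (fixLoopA path PySem.Set.empty [])

-- ===== PORT B =====
-- first half of Source B's loop: index of the first repeated element, if any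
def firstDupLoop : List String → PySem.Set String → Nat → Option Nat
  | [], _, _ => none
  | node :: rest, seen, i =>
    if PySem.Set.contains seen node then some i
    else firstDupLoop rest (PySem.Set.add seen node) (i + 1)

def fix_path_alt (path : List String) : Option (List String) :=
  match PySem.List.index? path "SmartOne" with   -- path.index('SmartOne'); none = ValueError branch
  | none => none
  | some s =>
    if firstDupLoop path PySem.Set.empty 0 = none ∨ (∃ di, firstDupLoop path PySem.Set.empty 0 = some di ∧ s < di) then
      some (PySem.List.slice path none (some ((s : Int) + 1)))   -- path[:s+1]
    else none

-- ===== PRECONDITION & SPEC =====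
-- Pre_ excludes only the empty list, on which A's new_path[-1] raises IndexError.
def Pre_fix_path (path : List String) : Prop := path ≠ []
instance (path : List String) : Decidable (Pre_fix_path path) := by unfold Pre_fix_path; infer_instance
def pvWitness_fix_path : List String := (["a", "SmartOne"])

def Spec_fix_path (path : List String) (out : Option (List String)) : Prop := out = fix_path_alt path
instance (path : List String) (out : Option (List String)) : Decidable (Spec_fix_path path out) := by unfold Spec_fix_path; infer_instance

-- ===== CLAIM (what is proved, stated in full; the proofs are below) =====
def Claim_equal_fix_path : Prop := ∀ (path : List String), Dom_fix_path path → Pre_fix_path path → Spec_fix_path path (fix_path path)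

-- ===== LEMMAS AND PROOFS =====

-- non-accumulator form of A's loop
def gA : List String → PySem.Set String → List String
  | [], _ => []
  | node :: rest, visited =>
    if PySem.Set.contains visited node then []
    else if node = "SmartOne" then [node]
    else node :: gA rest (PySem.Set.add visited node)

theorem fixLoopA_eq_gA (l : List String) : ∀ (v : PySem.Set String) (acc : List String),
    fixLoopA l v acc = acc ++ gA l v := by
  induction l with
  | nil => intro v acc; simp [fixLoopA, gA]
  | cons x r ih =>
    intro v acc
    simp only [fixLoopA, gA]
    split_ifs with h1 h2
    · simp
    · simp
    · rw [ih]; simp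

theorem firstDupLoop_shift (l : List String) : ∀ (v : PySem.Set String) (i : Nat),
    firstDupLoop l v i = (firstDupLoop l v 0).map (· + i) := by
  induction l with
  | nil => intro v i; simp [firstDupLoop]
  | cons x r ih =>
    intro v i
    simp only [firstDupLoop]
    split_ifs with h1
    · simp
    · rw [ih _ (i + 1), ih _ 1]
      cases firstDupLoop r (PySem.Set.add v x) 0
      · simp
      · simp
        omega

theorem firstDupLoop_one_none (l : List String) (v : PySem.Set String)
    (h : firstDupLoop l v 0 = none) : firstDupLoop l v 1 = none := by
  rw [firstDupLoop_shift, h]; rfl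

theorem firstDupLoop_one_some (l : List String) (v : PySem.Set String) (d : Nat)
    (h : firstDupLoop l v 0 = some d) : firstDupLoop l v 1 = some (d + 1) := by
  rw [firstDupLoop_shift, h]; rfl

-- the joint characterisation of A's truncation by B's two boundary indices
theorem main_lemma (l : List String) : ∀ (v : PySem.Set String),
    (match PySem.List.index? l "SmartOne", firstDupLoop l v 0 with
     | some s, none => gA l v = l.take (s + 1) ∧ (gA l v).getLast? = some "SmartOne"
     | some s, some di =>
        if s < di then gA l v = l.take (s + 1) ∧ (gA l v).getLast? = some "SmartOne"
        else (gA l v).getLast? ≠ some "SmartOne"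
     | none, _ => (gA l v).getLast? ≠ some "SmartOne") := by
  induction l with
  | nil => intro v; simp [PySem.List.index?, gA]
  | cons x r ih =>
    intro v
    simp only [gA, firstDupLoop]
    by_cases hv : PySem.Set.contains v x
    · simp only [if_pos hv]
      cases hs : PySem.List.index? (x :: r) "SmartOne" with
      | none => simp
      | some s => simp
    · simp only [if_neg hv]
      by_cases hx : x = "SmartOne"
      · subst hx
        rw [PySem.List.index?_cons_self]
        cases hd : firstDupLoop r (PySem.Set.add v "SmartOne") 0 with
        | none => rw [firstDupLoop_one_none _ _ hd]; simp [List.take]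
        | some di => rw [firstDupLoop_one_some _ _ _ hd]; simp [List.take]
      · rw [PySem.List.index?_cons_of_ne r hx]
        have := ih (PySem.Set.add v x)
        cases hs : PySem.List.index? r "SmartOne" with
        | none =>
          rw [hs] at this
          simp only [Option.map_none, if_neg hx]
          cases hd : firstDupLoop r (PySem.Set.add v x) 0 with
          | none =>
            rw [hd] at this; dsimp only at this
            cases hg : gA r (PySem.Set.add v x) with
            | nil => simp [hx]
            | cons y ys => rw [hg] at this; rw [List.getLast?_cons_cons]; exact this
          | some di =>
            rw [hd] at this; dsimp only at this
            cases hg : gA r (PySem.Set.add v x) with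
            | nil => simp [hx]
            | cons y ys => rw [hg] at this; rw [List.getLast?_cons_cons]; exact this
        | some s =>
          rw [hs] at this
          simp only [Option.map_some, if_neg hx]
          cases hd : firstDupLoop r (PySem.Set.add v x) 0 with
          | none =>
            rw [hd] at this; rw [firstDupLoop_one_none _ _ hd]
            dsimp only at this ⊢
            obtain ⟨h1, h2⟩ := this
            refine ⟨by rw [h1]; rfl, ?_⟩
            cases hg : gA r (PySem.Set.add v x) with
            | nil => rw [hg] at h2; simp at h2
            | cons y ys => rw [hg] at h2; rw [List.getLast?_cons_cons]; exact h2
          | some di =>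
            rw [hd] at this; rw [firstDupLoop_one_some _ _ _ hd]
            dsimp only at this ⊢
            by_cases hlt : s < di
            · rw [if_pos hlt] at this
              rw [if_pos (by omega : s + 1 < di + 1)]
              obtain ⟨h1, h2⟩ := this
              refine ⟨by rw [h1]; rfl, ?_⟩
              cases hg : gA r (PySem.Set.add v x) with
              | nil => rw [hg] at h2; simp at h2
              | cons y ys => rw [hg] at h2; rw [List.getLast?_cons_cons]; exact h2
            · rw [if_neg hlt] at this
              rw [if_neg (by omega : ¬ s + 1 < di + 1)]
              cases hg : gA r (PySem.Set.add v x) with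
              | nil => simp [hx]
              | cons y ys => rw [hg] at this; rw [List.getLast?_cons_cons]; exact this

theorem slice_take (path : List String) (s : Nat) :
    PySem.List.slice path none (some ((s : Int) + 1)) = path.take (s + 1) := by
  have : ((s : Int) + 1) = ((s + 1 : Nat) : Int) := by push_cast; ring
  rw [this, PySem.List.slice_to_natCast]

-- ===== VERDICT (by name: the statement is the Claim_ definition above) =====
theorem fix_path_spec : Claim_equal_fix_path := by
  intro path _ hpre
  unfold Spec_fix_path fix_path fix_path_alt
  rw [fixLoopA_eq_gA, List.nil_append, PySem.List.pyGet?_neg_one]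
  have := main_lemma path PySem.Set.empty
  cases hs : PySem.List.index? path "SmartOne" with
  | none =>
    rw [hs] at this
    cases hd : firstDupLoop path PySem.Set.empty 0 with
    | none =>
      rw [hd] at this; dsimp only at this ⊢
      cases hg : (gA path PySem.Set.empty).getLast? with
      | none => rfl
      | some last =>
        rw [hg] at this
        have hne : last ≠ "SmartOne" := fun h => this (by rw [h])
        dsimp only
        rw [if_pos hne]
    | some di =>
      rw [hd] at this; dsimp only at this ⊢
      cases hg : (gA path PySem.Set.empty).getLast? with
      | none => rfl
      | some last =>
        rw [hg] at this
        have hne : last ≠ "SmartOne" := fun h => this (by rw [h])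
        dsimp only
        rw [if_pos hne]
  | some s =>
    rw [hs] at this
    cases hd : firstDupLoop path PySem.Set.empty 0 with
    | none =>
      rw [hd] at this; dsimp only at this ⊢
      obtain ⟨h1, h2⟩ := this
      rw [h2]
      dsimp only
      rw [if_neg (by simp), if_pos (Or.inl rfl), slice_take, h1]
    | some di =>
      rw [hd] at this; dsimp only at this ⊢
      by_cases hlt : s < di
      · rw [if_pos hlt] at this
        obtain ⟨h1, h2⟩ := this
        rw [h2]
        dsimp only
        rw [if_neg (by simp), if_pos (Or.inr ⟨di, rfl, hlt⟩), slice_take, h1]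
      · rw [if_neg hlt] at this
        have hnot : ¬ ((some di : Option Nat) = none ∨ ∃ di', (some di : Option Nat) = some di' ∧ s < di') := by
          rintro (h | ⟨di', hdi, hlt'⟩)
          · simp_all
          · injection hdi with h'
            omega
        rw [if_neg hnot]
        cases hg : (gA path PySem.Set.empty).getLast? with
        | none => rfl
        | some last =>
          rw [hg] at this
          have hne : last ≠ "SmartOne" := fun h => this (by rw [h])
          dsimp only
          rw [if_pos hne]
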